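-- pv_equiv track=rewrite | github.com/2hyeb/CBNU | pii_detection_regex/regex_detector.py | _is_fuzzy_date_candidate
-- ===== SOURCE A (Python) =====
-- def _is_fuzzy_date_candidate(s: str) -> bool:
--     """날짜 후보인지 확인하는 헬퍼 함수"""
--     s = s.strip()
--     n = len(s)
--     for i in range(0, max(1, n - 7)):
--         part8 = s[i:i+8]
--         if len(part8) == 8 and part8.isdigit():
--             try:
--                 year = int(part8[0:4])
--                 month = int(part8[4:6])
--                 day = int(part8[6:8])
--                 if 1900 <= year <= 2100 and 1 <= month <= 12 and 1 <= day <= 31: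
--                     return True
--             except Exception:
--                 pass
--     for i in range(0, max(1, n - 5)):
--         part6 = s[i:i+6]
--         if len(part6) == 6 and part6.isdigit():
--             try:
--                 mm = int(part6[2:4])
--                 dd = int(part6[4:6])
--                 if 1 <= mm <= 12 and 1 <= dd <= 31:
--                     return True
--             except Exception:
--                 pass
--     return False
-- ===== SOURCE B (Python) =====
-- def _valid8(t, i):
--     y = int(t[i:i+4])
--     m = int(t[i+4:i+6])
--     d = int(t[i+6:i+8])
--     return 1900 <= y <= 2100 and 1 <= m <= 12 and 1 <= d <= 31
--
--
-- def _valid6(t, i):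
--     m = int(t[i+2:i+4])
--     d = int(t[i+4:i+6])
--     return 1 <= m <= 12 and 1 <= d <= 31
--
--
-- def _is_fuzzy_date_candidate(s: str) -> bool:
--     t = s.strip()
--     # run[i] = length of the maximal digit run starting at position i
--     run = [0]
--     for c in reversed(t):
--         run.append(run[-1] + 1 if c.isdigit() else 0)
--     run.reverse()
--     return any((run[i] >= 8 and _valid8(t, i)) or (run[i] >= 6 and _valid6(t, i))
--                for i in range(len(t)))
-- ===== Notes on version B (the rewrite author's own statement) =====
-- stated objective: faster
-- what changed: Replaces A's two separate windowed scans (each re-testing every 8- or 6-char slice for digitness) by one right-to-left suffix scan computing the digit-run length at every position, then a single pass that checks both window shapes per position guarded by the run length.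
import Mathlib
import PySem

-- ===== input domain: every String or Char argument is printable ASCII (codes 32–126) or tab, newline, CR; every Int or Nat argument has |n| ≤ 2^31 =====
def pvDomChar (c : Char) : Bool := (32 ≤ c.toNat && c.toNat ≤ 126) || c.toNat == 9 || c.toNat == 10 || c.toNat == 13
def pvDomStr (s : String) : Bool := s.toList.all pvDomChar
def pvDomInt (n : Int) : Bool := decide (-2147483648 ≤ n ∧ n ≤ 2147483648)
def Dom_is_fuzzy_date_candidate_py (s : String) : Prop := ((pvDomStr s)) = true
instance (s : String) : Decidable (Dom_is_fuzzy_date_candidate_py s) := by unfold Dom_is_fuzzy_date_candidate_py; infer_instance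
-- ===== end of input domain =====

-- B replaces A's two windowed scans (which re-test every 8-/6-char slice for digitness) by one
-- right-to-left suffix scan of digit-run lengths plus a single guarded pass; same return value.

-- ===== PORT A =====
-- Transliteration of _is_fuzzy_date_candidate: two sequential early-return loops (ported as
-- `anyA || anyB`, short-circuiting like Python's returns); try/except around int() ported as a
-- match on PySem.Int.ofStr? with the `none` (= exception) branches giving `pass` (false).
def is_fuzzy_date_candidate_py (s : String) : Bool :=
  let t := PySem.Str.strip s
  let n : Int := PySem.Str.len t
  ((PySem.List.pyRange 0 (max 1 (n - 7)) 1).any (fun i =>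
    let part8 := PySem.Str.slice t (some i) (some (i + 8))
    if PySem.Str.len part8 == 8 && PySem.Str.strIsdigit part8 then
      match PySem.Int.ofStr? (PySem.Str.slice part8 (some 0) (some 4)),
            PySem.Int.ofStr? (PySem.Str.slice part8 (some 4) (some 6)),
            PySem.Int.ofStr? (PySem.Str.slice part8 (some 6) (some 8)) with
      | some year, some month, some day =>
          decide (1900 ≤ year) && decide (year ≤ 2100) &&
          decide (1 ≤ month) && decide (month ≤ 12) &&
          decide (1 ≤ day) && decide (day ≤ 31)
      | _, _, _ => false
    else false))
  ||
  ((PySem.List.pyRange 0 (max 1 (n - 5)) 1).any (fun i =>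
    let part6 := PySem.Str.slice t (some i) (some (i + 6))
    if PySem.Str.len part6 == 6 && PySem.Str.strIsdigit part6 then
      match PySem.Int.ofStr? (PySem.Str.slice part6 (some 2) (some 4)),
            PySem.Int.ofStr? (PySem.Str.slice part6 (some 4) (some 6)) with
      | some mm, some dd =>
          decide (1 ≤ mm) && decide (mm ≤ 12) && decide (1 ≤ dd) && decide (dd ≤ 31)
      | _, _ => false
    else false))

-- ===== PORT B =====
-- Port of Source B. `_valid8`/`_valid6` call int() unguarded; callers only reach them when the run
-- guard holds (all-digit slices), so int() cannot raise there — the `none` branch (false) is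
-- unreachable totalisation.
def pvValid8 (t : String) (i : Int) : Bool :=
  match PySem.Int.ofStr? (PySem.Str.slice t (some i) (some (i + 4))) with
  | none => false
  | some y =>
    match PySem.Int.ofStr? (PySem.Str.slice t (some (i + 4)) (some (i + 6))) with
    | none => false
    | some m =>
      match PySem.Int.ofStr? (PySem.Str.slice t (some (i + 6)) (some (i + 8))) with
      | none => false
      | some d =>
          decide (1900 ≤ y) && decide (y ≤ 2100) &&
          decide (1 ≤ m) && decide (m ≤ 12) && decide (1 ≤ d) && decide (d ≤ 31)

def pvValid6 (t : String) (i : Int) : Bool :=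
  match PySem.Int.ofStr? (PySem.Str.slice t (some (i + 2)) (some (i + 4))) with
  | none => false
  | some m =>
    match PySem.Int.ofStr? (PySem.Str.slice t (some (i + 4)) (some (i + 6))) with
    | none => false
    | some d => decide (1 ≤ m) && decide (m ≤ 12) && decide (1 ≤ d) && decide (d ≤ 31)

-- Source B's `run` list built right-to-left (reversed/append/reverse), as structural recursion from
-- the right: pvRun t = [run[0], …, run[n]] with run[i] = digit-run length starting at i.
def pvRun : List Char → List Nat
  | [] => [0]
  | c :: cs => (if PySem.Chars.isdigit c then (pvRun cs).headD 0 + 1 else 0) :: pvRun cs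

def is_fuzzy_date_candidate_py_alt (s : String) : Bool :=
  let t := PySem.Str.strip s
  let run := pvRun t.toList
  (List.range t.toList.length).any (fun i =>
    (decide (8 ≤ run.getD i 0) && pvValid8 t (i : Int)) ||
    (decide (6 ≤ run.getD i 0) && pvValid6 t (i : Int)))

-- ===== PRECONDITION & SPEC =====
def Spec_is_fuzzy_date_candidate_py (s : String) (out : Bool) : Prop := out = is_fuzzy_date_candidate_py_alt s
instance (s : String) (out : Bool) : Decidable (Spec_is_fuzzy_date_candidate_py s out) := by unfold Spec_is_fuzzy_date_candidate_py; infer_instance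

-- ===== CLAIM (what is proved, stated in full; the proofs are below) =====
def Claim_equal_is_fuzzy_date_candidate_py : Prop := ∀ (s : String), Dom_is_fuzzy_date_candidate_py s → Spec_is_fuzzy_date_candidate_py s (is_fuzzy_date_candidate_py s)


-- ===== LEMMAS AND PROOFS =====

theorem pvRun_headD (cs : List Char) : (pvRun cs).headD 0 = (pvRun cs).getD 0 0 := by
  cases cs <;> rfl

-- run-length characterisation: run[i] ≥ k  ↔  the k-window at i is full and all digits
theorem pvRun_ge (t : List Char) : ∀ (i k : Nat),
    k ≤ (pvRun t).getD i 0 ↔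
      (((t.drop i).take k).length = k ∧ ((t.drop i).take k).all PySem.Chars.isdigit = true) := by
  induction t with
  | nil =>
      intro i k
      cases i with
      | zero => simp [pvRun]; omega
      | succ j => simp [pvRun, List.getD]; omega
  | cons c cs ih =>
      intro i k
      cases i with
      | succ j => simpa [pvRun] using ih j k
      | zero =>
          cases k with
          | zero => simp
          | succ k' =>
              by_cases hd : PySem.Chars.isdigit c = true
              · have hih := ih 0 k'
                simp only [List.drop_zero] at hih
                simp only [pvRun, List.getD_cons_zero, hd, if_true, List.drop_zero,
                  List.take_succ_cons, List.length_cons, List.all_cons, Bool.and_eq_true,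
                  pvRun_headD, true_and]
                constructor
                · intro h
                  obtain ⟨h1, h2⟩ := hih.mp (by omega)
                  exact ⟨by omega, h2⟩
                · rintro ⟨h1, h2⟩
                  have := hih.mpr ⟨by omega, h2⟩
                  omega
              · have hd' : PySem.Chars.isdigit c = false := by simpa using hd
                simp [pvRun, hd', List.take_succ_cons]

theorem run_len_bound (l : List Char) (k m : Nat) (h : m ≤ (pvRun l).getD k 0) (hm : 1 ≤ m) :
    k + m ≤ l.length := by
  have h2 := ((pvRun_ge l k m).mp h).1
  simp [List.length_take, List.length_drop] at h2
  omega

theorem guard8_eq (l : List Char) (k : Nat) :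
    (((((l.drop k).take 8).length : Int) == 8) && PySem.Chars.strIsdigit ((l.drop k).take 8))
      = decide (8 ≤ (pvRun l).getD k 0) := by
  rw [Bool.eq_iff_iff]
  simp only [Bool.and_eq_true, beq_iff_eq, decide_eq_true_eq, PySem.Chars.strIsdigit,
    Bool.not_eq_true']
  rw [pvRun_ge]
  constructor
  · rintro ⟨h1, _, h3⟩
    exact ⟨by exact_mod_cast h1, h3⟩
  · rintro ⟨h1, h2⟩
    refine ⟨by exact_mod_cast h1, ?_, h2⟩
    simp only [List.isEmpty_eq_false_iff, ne_eq]
    intro hnil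
    rw [hnil] at h1
    simp at h1

theorem guard6_eq (l : List Char) (k : Nat) :
    (((((l.drop k).take 6).length : Int) == 6) && PySem.Chars.strIsdigit ((l.drop k).take 6))
      = decide (6 ≤ (pvRun l).getD k 0) := by
  rw [Bool.eq_iff_iff]
  simp only [Bool.and_eq_true, beq_iff_eq, decide_eq_true_eq, PySem.Chars.strIsdigit,
    Bool.not_eq_true']
  rw [pvRun_ge]
  constructor
  · rintro ⟨h1, _, h3⟩
    exact ⟨by exact_mod_cast h1, h3⟩
  · rintro ⟨h1, h2⟩
    refine ⟨by exact_mod_cast h1, ?_, h2⟩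
    simp only [List.isEmpty_eq_false_iff, ne_eq]
    intro hnil
    rw [hnil] at h1
    simp at h1

-- A's 8-window body at index ↑k equals B's run-guarded 8-check
theorem pv_toList_ofList (cs : List Char) : (String.ofList cs).toList = cs := by
  simp

set_option maxHeartbeats 1000000 in
theorem body8_eq (t : String) (k : Nat) :
    (if PySem.Str.len (PySem.Str.slice t (some (k : Int)) (some ((k : Int) + 8))) == 8 &&
        PySem.Str.strIsdigit (PySem.Str.slice t (some (k : Int)) (some ((k : Int) + 8))) then
       match PySem.Int.ofStr? (PySem.Str.slice (PySem.Str.slice t (some (k : Int)) (some ((k : Int) + 8))) (some 0) (some 4)),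
             PySem.Int.ofStr? (PySem.Str.slice (PySem.Str.slice t (some (k : Int)) (some ((k : Int) + 8))) (some 4) (some 6)),
             PySem.Int.ofStr? (PySem.Str.slice (PySem.Str.slice t (some (k : Int)) (some ((k : Int) + 8))) (some 6) (some 8)) with
       | some year, some month, some day =>
           decide (1900 ≤ year) && decide (year ≤ 2100) &&
           decide (1 ≤ month) && decide (month ≤ 12) &&
           decide (1 ≤ day) && decide (day ≤ 31)
       | _, _, _ => false
     else false)
    = (decide (8 ≤ (pvRun t.toList).getD k 0) && pvValid8 t (k : Int)) := by
  have hw : PySem.List.slice t.toList (some (k : Int)) (some ((k : Int) + 8))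
      = (t.toList.drop k).take 8 := by
    rw [show ((k : Int) + 8) = ((k : Int) + ((8 : Nat) : Int)) by norm_num,
      PySem.List.slice_natCast_add]
  -- list-level values of the slices involved
  have b04 : PySem.List.slice t.toList (some (k : Int)) (some ((k : Int) + 4))
      = (t.toList.drop k).take 4 := by
    rw [show ((k : Int) + 4) = ((k : Int) + ((4 : Nat) : Int)) by norm_num,
      PySem.List.slice_natCast_add]
  have b46 : PySem.List.slice t.toList (some ((k : Int) + 4)) (some ((k : Int) + 6))
      = (t.toList.drop (k + 4)).take 2 := by
    rw [show ((k : Int) + 4) = (((k + 4 : Nat)) : Int) by push_cast; ring,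
      show ((k : Int) + 6) = (((k + 6 : Nat)) : Int) by push_cast; ring,
      PySem.List.slice_natCast, show k + 6 - (k + 4) = 2 by omega]
  have b68 : PySem.List.slice t.toList (some ((k : Int) + 6)) (some ((k : Int) + 8))
      = (t.toList.drop (k + 6)).take 2 := by
    rw [show ((k : Int) + 6) = (((k + 6 : Nat)) : Int) by push_cast; ring,
      show ((k : Int) + 8) = (((k + 8 : Nat)) : Int) by push_cast; ring,
      PySem.List.slice_natCast, show k + 8 - (k + 6) = 2 by omega]
  have s04 : PySem.List.slice ((t.toList.drop k).take 8) (some 0) (some 4)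
      = ((t.toList.drop k).take 8).take 4 := by
    have := PySem.List.slice_toNat ((t.toList.drop k).take 8) (a := 0) (b := 4)
      (by norm_num) (by norm_num)
    simpa using this
  have s46 : PySem.List.slice ((t.toList.drop k).take 8) (some 4) (some 6)
      = (((t.toList.drop k).take 8).drop 4).take 2 := by
    have := PySem.List.slice_toNat ((t.toList.drop k).take 8) (a := 4) (b := 6)
      (by norm_num) (by norm_num)
    simpa using this
  have s68 : PySem.List.slice ((t.toList.drop k).take 8) (some 6) (some 8)
      = (((t.toList.drop k).take 8).drop 6).take 2 := by
    have := PySem.List.slice_toNat ((t.toList.drop k).take 8) (a := 6) (b := 8)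
      (by norm_num) (by norm_num)
    simpa using this
  -- the three inner string slices of part8 are the direct string slices B takes
  have A1 : PySem.Str.slice (PySem.Str.slice t (some (k : Int)) (some ((k : Int) + 8))) (some 0) (some 4)
      = PySem.Str.slice t (some (k : Int)) (some ((k : Int) + 4)) := by
    unfold PySem.Str.slice
    refine congrArg String.ofList ?_
    simp only [pv_toList_ofList, PySem.Chars.slice_eq_listSlice]
    rw [hw, s04, b04, List.take_take]
    norm_num
  have A2 : PySem.Str.slice (PySem.Str.slice t (some (k : Int)) (some ((k : Int) + 8))) (some 4) (some 6)
      = PySem.Str.slice t (some ((k : Int) + 4)) (some ((k : Int) + 6)) := by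
    unfold PySem.Str.slice
    refine congrArg String.ofList ?_
    simp only [pv_toList_ofList, PySem.Chars.slice_eq_listSlice]
    rw [hw, s46, b46, List.drop_take, List.take_take, List.drop_drop]
    norm_num
  have A3 : PySem.Str.slice (PySem.Str.slice t (some (k : Int)) (some ((k : Int) + 8))) (some 6) (some 8)
      = PySem.Str.slice t (some ((k : Int) + 6)) (some ((k : Int) + 8)) := by
    unfold PySem.Str.slice
    refine congrArg String.ofList ?_
    simp only [pv_toList_ofList, PySem.Chars.slice_eq_listSlice]
    rw [hw, s68, b68, List.drop_take, List.take_take, List.drop_drop]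
    norm_num
  have hG : (PySem.Str.len (PySem.Str.slice t (some (k : Int)) (some ((k : Int) + 8))) == 8 &&
        PySem.Str.strIsdigit (PySem.Str.slice t (some (k : Int)) (some ((k : Int) + 8))))
      = decide (8 ≤ (pvRun t.toList).getD k 0) := by
    rw [PySem.Str.len_eq, PySem.Str.strIsdigit_eq, PySem.Str.toList_slice,
      PySem.Chars.slice_eq_listSlice, hw, guard8_eq]
  rw [A1, A2, A3, hG]
  unfold pvValid8
  generalize decide (8 ≤ (pvRun t.toList).getD k 0) = g
  cases g
  · rfl
  · cases PySem.Int.ofStr? (PySem.Str.slice t (some (k : Int)) (some ((k : Int) + 4))) <;>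
      cases PySem.Int.ofStr? (PySem.Str.slice t (some ((k : Int) + 4)) (some ((k : Int) + 6))) <;>
      cases PySem.Int.ofStr? (PySem.Str.slice t (some ((k : Int) + 6)) (some ((k : Int) + 8))) <;>
      rfl

set_option maxHeartbeats 1000000 in
theorem body6_eq (t : String) (k : Nat) :
    (if PySem.Str.len (PySem.Str.slice t (some (k : Int)) (some ((k : Int) + 6))) == 6 &&
        PySem.Str.strIsdigit (PySem.Str.slice t (some (k : Int)) (some ((k : Int) + 6))) then
       match PySem.Int.ofStr? (PySem.Str.slice (PySem.Str.slice t (some (k : Int)) (some ((k : Int) + 6))) (some 2) (some 4)),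
             PySem.Int.ofStr? (PySem.Str.slice (PySem.Str.slice t (some (k : Int)) (some ((k : Int) + 6))) (some 4) (some 6)) with
       | some mm, some dd =>
           decide (1 ≤ mm) && decide (mm ≤ 12) && decide (1 ≤ dd) && decide (dd ≤ 31)
       | _, _ => false
     else false)
    = (decide (6 ≤ (pvRun t.toList).getD k 0) && pvValid6 t (k : Int)) := by
  have hw : PySem.List.slice t.toList (some (k : Int)) (some ((k : Int) + 6))
      = (t.toList.drop k).take 6 := by
    rw [show ((k : Int) + 6) = ((k : Int) + ((6 : Nat) : Int)) by norm_num,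
      PySem.List.slice_natCast_add]
  have b24 : PySem.List.slice t.toList (some ((k : Int) + 2)) (some ((k : Int) + 4))
      = (t.toList.drop (k + 2)).take 2 := by
    rw [show ((k : Int) + 2) = (((k + 2 : Nat)) : Int) by push_cast; ring,
      show ((k : Int) + 4) = (((k + 4 : Nat)) : Int) by push_cast; ring,
      PySem.List.slice_natCast, show k + 4 - (k + 2) = 2 by omega]
  have b46 : PySem.List.slice t.toList (some ((k : Int) + 4)) (some ((k : Int) + 6))
      = (t.toList.drop (k + 4)).take 2 := by
    rw [show ((k : Int) + 4) = (((k + 4 : Nat)) : Int) by push_cast; ring,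
      show ((k : Int) + 6) = (((k + 6 : Nat)) : Int) by push_cast; ring,
      PySem.List.slice_natCast, show k + 6 - (k + 4) = 2 by omega]
  have s24 : PySem.List.slice ((t.toList.drop k).take 6) (some 2) (some 4)
      = (((t.toList.drop k).take 6).drop 2).take 2 := by
    have := PySem.List.slice_toNat ((t.toList.drop k).take 6) (a := 2) (b := 4)
      (by norm_num) (by norm_num)
    simpa using this
  have s46 : PySem.List.slice ((t.toList.drop k).take 6) (some 4) (some 6)
      = (((t.toList.drop k).take 6).drop 4).take 2 := by
    have := PySem.List.slice_toNat ((t.toList.drop k).take 6) (a := 4) (b := 6)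
      (by norm_num) (by norm_num)
    simpa using this
  have A1 : PySem.Str.slice (PySem.Str.slice t (some (k : Int)) (some ((k : Int) + 6))) (some 2) (some 4)
      = PySem.Str.slice t (some ((k : Int) + 2)) (some ((k : Int) + 4)) := by
    unfold PySem.Str.slice
    refine congrArg String.ofList ?_
    simp only [pv_toList_ofList, PySem.Chars.slice_eq_listSlice]
    rw [hw, s24, b24, List.drop_take, List.take_take, List.drop_drop]
    norm_num
  have A2 : PySem.Str.slice (PySem.Str.slice t (some (k : Int)) (some ((k : Int) + 6))) (some 4) (some 6)
      = PySem.Str.slice t (some ((k : Int) + 4)) (some ((k : Int) + 6)) := by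
    unfold PySem.Str.slice
    refine congrArg String.ofList ?_
    simp only [pv_toList_ofList, PySem.Chars.slice_eq_listSlice]
    rw [hw, s46, b46, List.drop_take, List.take_take, List.drop_drop]
    norm_num
  have hG : (PySem.Str.len (PySem.Str.slice t (some (k : Int)) (some ((k : Int) + 6))) == 6 &&
        PySem.Str.strIsdigit (PySem.Str.slice t (some (k : Int)) (some ((k : Int) + 6))))
      = decide (6 ≤ (pvRun t.toList).getD k 0) := by
    rw [PySem.Str.len_eq, PySem.Str.strIsdigit_eq, PySem.Str.toList_slice,
      PySem.Chars.slice_eq_listSlice, hw, guard6_eq]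
  rw [A1, A2, hG]
  unfold pvValid6
  generalize decide (6 ≤ (pvRun t.toList).getD k 0) = g
  cases g
  · rfl
  · cases PySem.Int.ofStr? (PySem.Str.slice t (some ((k : Int) + 2)) (some ((k : Int) + 4))) <;>
      cases PySem.Int.ofStr? (PySem.Str.slice t (some ((k : Int) + 4)) (some ((k : Int) + 6))) <;>
      rfl

-- ===== VERDICT (by name: the statement is the Claim_ definition above) =====
set_option maxHeartbeats 1000000 in
theorem is_fuzzy_date_candidate_py_spec : Claim_equal_is_fuzzy_date_candidate_py := by
  intro s _
  unfold Spec_is_fuzzy_date_candidate_py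
  simp only [is_fuzzy_date_candidate_py, is_fuzzy_date_candidate_py_alt]
  rw [Bool.eq_iff_iff]
  simp only [Bool.or_eq_true, List.any_eq_true, PySem.List.mem_pyRange_one, List.mem_range]
  constructor
  · rintro (⟨i, ⟨h0, hi⟩, hf⟩ | ⟨i, ⟨h0, hi⟩, hf⟩)
    · obtain ⟨k, rfl⟩ : ∃ k : Nat, i = (k : Int) := ⟨i.toNat, (Int.toNat_of_nonneg h0).symm⟩
      rw [body8_eq] at hf
      have hc := hf
      simp only [Bool.and_eq_true, decide_eq_true_eq] at hc
      have hb := run_len_bound (PySem.Str.strip s).toList k 8 hc.1 (by norm_num)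
      exact ⟨k, by omega, Or.inl hf⟩
    · obtain ⟨k, rfl⟩ : ∃ k : Nat, i = (k : Int) := ⟨i.toNat, (Int.toNat_of_nonneg h0).symm⟩
      rw [body6_eq] at hf
      have hc := hf
      simp only [Bool.and_eq_true, decide_eq_true_eq] at hc
      have hb := run_len_bound (PySem.Str.strip s).toList k 6 hc.1 (by norm_num)
      exact ⟨k, by omega, Or.inr hf⟩
  · rintro ⟨k, hk, (hf | hf)⟩
    · have hc := hf
      simp only [Bool.and_eq_true, decide_eq_true_eq] at hc
      have hb := run_len_bound (PySem.Str.strip s).toList k 8 hc.1 (by norm_num)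
      refine Or.inl ⟨(k : Int), ⟨Int.natCast_nonneg k, ?_⟩, ?_⟩
      · rw [PySem.Str.len_eq]
        omega
      · rw [body8_eq]
        exact hf
    · have hc := hf
      simp only [Bool.and_eq_true, decide_eq_true_eq] at hc
      have hb := run_len_bound (PySem.Str.strip s).toList k 6 hc.1 (by norm_num)
      refine Or.inr ⟨(k : Int), ⟨Int.natCast_nonneg k, ?_⟩, ?_⟩
      · rw [PySem.Str.len_eq]
        omega
      · rw [body6_eq]
        exact hf
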